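-- pv_equiv track=rewrite | github.com/ShreshthRajan/CS124 | ppset3/partition.py | kk
-- ===== SOURCE A (Python) =====
-- import heapq
--
-- def kk(array):
--     size = len(array)
--
--     # Remove elements for a max-heap behavior with min-heap structure
--     ignored = [-x for x in array]
--     heapq.heapify(ignored)
--
--     # Repeatedly combines two largest elements until one remains
--     for i in range(size-1):
--         max = heapq.heappop(ignored)
--         second_max = heapq.heappop(ignored)
--         heapq.heappush(ignored, (max-second_max))
--     return -ignored[0]
-- ===== SOURCE B (Python) =====
-- def kk(array):
--     # sort once (descending); repeatedly combine the two largest at the front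
--     # (advancing a pointer instead of popping) and re-insert the difference at
--     # its sorted position, found by binary search; no heap needed
--     work = sorted(array, reverse=True)
--     i = 0
--     for _ in range(len(array) - 1):
--         d = work[i] - work[i + 1]
--         i += 2
--         lo, hi = i, len(work)
--         while lo < hi:
--             mid = (lo + hi) // 2
--             if work[mid] > d:
--                 lo = mid + 1
--             else:
--                 hi = mid
--         work.insert(lo, d)
--     return work[i]
-- ===== Notes on version B (the rewrite author's own statement) =====
-- stated objective: alternative
-- what changed: Replaces the negated min-heap with a single descending sort plus a front pointer, combining the two largest at the front and re-inserting each difference at its sorted position found by binary search.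
import Mathlib
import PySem

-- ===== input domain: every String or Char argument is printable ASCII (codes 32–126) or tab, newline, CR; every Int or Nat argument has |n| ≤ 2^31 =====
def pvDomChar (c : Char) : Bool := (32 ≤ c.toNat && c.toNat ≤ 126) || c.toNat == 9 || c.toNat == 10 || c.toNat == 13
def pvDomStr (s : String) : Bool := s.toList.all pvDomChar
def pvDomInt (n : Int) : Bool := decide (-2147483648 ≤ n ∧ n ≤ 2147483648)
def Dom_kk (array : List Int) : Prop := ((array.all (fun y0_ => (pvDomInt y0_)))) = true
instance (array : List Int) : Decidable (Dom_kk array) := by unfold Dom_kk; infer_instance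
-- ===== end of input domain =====

-- B replaces A's heap with a descending sort plus ordered re-insertion; equal residue proved for nonempty input.

-- ===== PORT A =====
-- heapq is modelled by its observable Int semantics: heappop returns the heap's
-- minimum value and removes one occurrence of it; heappush adds an element;
-- heapify is the identity on the multiset. For Int contents these values are
-- exactly what Python's heapq returns.
def kkPopMin : List Int → Option (Int × List Int)
  | [] => none
  | x :: xs =>
    match kkPopMin xs with
    | none => some (x, [])
    | some (m, r) => if x ≤ m then some (x, xs) else some (m, x :: r)

def kkLoop : Nat → List Int → List Int
  | 0, h => h
  | n + 1, h =>
    match kkPopMin h with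
    | none => h          -- Python heappop would raise here (excluded by Pre_kk)
    | some (m, h1) =>
      match kkPopMin h1 with
      | none => h1       -- Python heappop would raise here (excluded by Pre_kk)
      | some (m2, h2) => kkLoop n (h2 ++ [m - m2])

def kk (array : List Int) : Int :=
  let size := array.length
  let ignored := array.map (fun x => -x)
  let final := kkLoop (size - 1) ignored
  -- ignored[0] is the heap root, i.e. the minimum of the remaining heap
  match kkPopMin final with
  | some (m, _) => -m
  | none => 0            -- ignored[0] raises IndexError in Python (excluded by Pre_kk)

-- ===== PORT B =====
-- the binary search 'while lo < hi: …' of Source B, on the active suffix of work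
-- (fuel = hi - lo bounds the iteration count; each step shrinks hi - lo)
def kkFind (w : List Int) (d : Int) : Nat → Nat → Nat → Nat
  | lo, _, 0 => lo
  | lo, hi, fuel + 1 =>
    if lo < hi then
      if w.getD ((lo + hi) / 2) 0 > d then kkFind w d ((lo + hi) / 2 + 1) hi fuel
      else kkFind w d lo ((lo + hi) / 2) fuel
    else lo

-- Source B never reads work[:i] again, so the port carries the active suffix
-- work[i:]; 'i += 2' is dropping the two front elements, work.insert(lo, d)
-- is insertIdx relative to the suffix
def kkAltLoop : Nat → List Int → List Int
  | 0, w => w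
  | n + 1, w =>
    match w with
    | a :: b :: rest =>
      kkAltLoop n (rest.insertIdx (kkFind rest (a - b) 0 rest.length rest.length) (a - b))
    | _ => w             -- work[i+1] would raise IndexError here (excluded by Pre_kk)

def kk_alt (array : List Int) : Int :=
  let work := PySem.List.sorted array (fun x => x) true
  let w := kkAltLoop (array.length - 1) work
  match PySem.List.pyGet? w 0 with
  | some x => x
  | none => 0            -- work[0] raises IndexError in Python (excluded by Pre_kk)

-- ===== PRECONDITION & SPEC =====
-- Pre_kk excludes only the empty list, on which both Pythons raise IndexError.
def Pre_kk (array : List Int) : Prop := array ≠ []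
instance (array : List Int) : Decidable (Pre_kk array) := by unfold Pre_kk; infer_instance
def pvWitness_kk : List Int := ([5, 3, 8])
def Spec_kk (array : List Int) (out : Int) : Prop := out = kk_alt array
instance (array : List Int) (out : Int) : Decidable (Spec_kk array out) := by unfold Spec_kk; infer_instance

-- ===== CLAIM (what is proved, stated in full; the proofs are below) =====
def Claim_equal_kk : Prop := ∀ (array : List Int), Dom_kk array → Pre_kk array → Spec_kk array (kk array)

-- ===== LEMMAS AND PROOFS =====

-- proof-side characterisation of where the binary search lands: kkIns is the
-- order-preserving insertion into a descending list
def kkIns : List Int → Int → List Int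
  | [], d => [d]
  | x :: xs, d => if x > d then x :: kkIns xs d else d :: x :: xs

theorem kkGetD_mono (w : List Int) (hsort : w.Pairwise (· ≥ ·)) (i j : Nat)
    (hij : i ≤ j) (hj : j < w.length) : w.getD j 0 ≤ w.getD i 0 := by
  rcases Nat.lt_or_ge i j with h | h
  · have := (List.pairwise_iff_getElem.mp hsort) i j (by omega) hj h
    rw [List.getD_eq_getElem w 0 (by omega : i < w.length),
        List.getD_eq_getElem w 0 hj]
    exact this
  · have : i = j := by omega
    subst this; exact le_refl _

theorem kkFind_spec (w : List Int) (d : Int) (hsort : w.Pairwise (· ≥ ·)) :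
    ∀ (fuel lo hi : Nat), lo ≤ hi → hi ≤ w.length → hi - lo ≤ fuel →
    (∀ k, k < lo → w.getD k 0 > d) →
    (∀ k, hi ≤ k → k < w.length → w.getD k 0 ≤ d) →
    lo ≤ kkFind w d lo hi fuel ∧ kkFind w d lo hi fuel ≤ hi ∧
    (∀ k, k < kkFind w d lo hi fuel → w.getD k 0 > d) ∧
    (∀ k, kkFind w d lo hi fuel ≤ k → k < w.length → w.getD k 0 ≤ d) := by
  intro fuel
  induction fuel with
  | zero =>
    intro lo hi hle hhiw hfuel hlo hhi
    have : lo = hi := by omega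
    subst this
    exact ⟨le_refl _, le_refl _, hlo, hhi⟩
  | succ fuel ih =>
    intro lo hi hle hhiw hfuel hlo hhi
    by_cases hlt : lo < hi
    · have hmidlt : (lo + hi) / 2 < hi := by omega
      have hmidge : lo ≤ (lo + hi) / 2 := by omega
      by_cases hcmp : w.getD ((lo + hi) / 2) 0 > d
      · have unf : kkFind w d lo hi (fuel + 1) =
            if lo < hi then
              (if w.getD ((lo + hi) / 2) 0 > d then kkFind w d ((lo + hi) / 2 + 1) hi fuel
               else kkFind w d lo ((lo + hi) / 2) fuel)
            else lo := rfl
        have step : kkFind w d lo hi (fuel + 1) = kkFind w d ((lo + hi) / 2 + 1) hi fuel := by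
          rw [unf, if_pos hlt, if_pos hcmp]
        rw [step]
        refine (ih ((lo + hi) / 2 + 1) hi (by omega) hhiw (by omega) ?_ hhi).imp ?_ id
        · intro k hk
          rcases Nat.lt_or_ge k lo with h | h
          · exact hlo k h
          · have : w.getD ((lo + hi) / 2) 0 ≤ w.getD k 0 :=
              kkGetD_mono w hsort k ((lo + hi) / 2) (by omega) (by omega)
            omega
        · intro h; omega
      · have unf : kkFind w d lo hi (fuel + 1) =
            if lo < hi then
              (if w.getD ((lo + hi) / 2) 0 > d then kkFind w d ((lo + hi) / 2 + 1) hi fuel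
               else kkFind w d lo ((lo + hi) / 2) fuel)
            else lo := rfl
        have step : kkFind w d lo hi (fuel + 1) = kkFind w d lo ((lo + hi) / 2) fuel := by
          rw [unf, if_pos hlt, if_neg hcmp]
        rw [step]
        have hcmp' : w.getD ((lo + hi) / 2) 0 ≤ d := by omega
        refine (ih lo ((lo + hi) / 2) (by omega) (by omega) (by omega) hlo ?_).imp id ?_
        · intro k hk hkw
          rcases Nat.lt_or_ge k hi with h | h
          · have : w.getD k 0 ≤ w.getD ((lo + hi) / 2) 0 :=
              kkGetD_mono w hsort ((lo + hi) / 2) k hk hkw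
            omega
          · exact hhi k h hkw
        · intro h
          exact ⟨by omega, h.2.1, h.2.2⟩
    · have : lo = hi := by omega
      subst this
      have unf : kkFind w d lo lo (fuel + 1) =
          if lo < lo then
            (if w.getD ((lo + lo) / 2) 0 > d then kkFind w d ((lo + lo) / 2 + 1) lo fuel
             else kkFind w d lo ((lo + lo) / 2) fuel)
          else lo := rfl
      have step : kkFind w d lo lo (fuel + 1) = lo := by
        rw [unf, if_neg (lt_irrefl lo)]
      rw [step]
      exact ⟨le_refl _, le_refl _, hlo, hhi⟩

theorem kkInsertIdx_eq_kkIns (d : Int) :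
    ∀ (rest : List Int) (j : Nat), j ≤ rest.length →
    (∀ k, k < j → rest.getD k 0 > d) →
    (∀ k, j ≤ k → k < rest.length → rest.getD k 0 ≤ d) →
    rest.insertIdx j d = kkIns rest d := by
  intro rest
  induction rest with
  | nil =>
    intro j hj _ _
    have : j = 0 := by simpa using hj
    subst this
    simp [kkIns]
  | cons x xs ih =>
    intro j hj hlo hhi
    cases j with
    | zero =>
      have : x ≤ d := by
        have := hhi 0 (by omega) (by simp)
        simpa using this
      simp [kkIns, not_lt.mpr this]
    | succ j =>
      have hx : x > d := by
        have := hlo 0 (by omega)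
        simpa using this
      have hrec : xs.insertIdx j d = kkIns xs d := by
        refine ih j (by simpa using hj) ?_ ?_
        · intro k hk
          have := hlo (k + 1) (by omega)
          simpa using this
        · intro k hk hkw
          have := hhi (k + 1) (by omega) (by simpa using hkw)
          simpa using this
      simp [List.insertIdx_succ_cons, kkIns, hx, hrec]

theorem kkPopMin_none_iff (l : List Int) : kkPopMin l = none ↔ l = [] := by
  cases l with
  | nil => simp [kkPopMin]
  | cons x xs =>
    simp only [kkPopMin]
    cases h : kkPopMin xs with
    | none => simp
    | some p => cases p with | mk m r => by_cases hx : x ≤ m <;> simp [hx]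

theorem kkPopMin_spec (l : List Int) (m : Int) (r : List Int)
    (h : kkPopMin l = some (m, r)) : (m :: r).Perm l ∧ ∀ y ∈ l, m ≤ y := by
  induction l generalizing m r with
  | nil => simp [kkPopMin] at h
  | cons x xs ih =>
    simp only [kkPopMin] at h
    cases hx : kkPopMin xs with
    | none =>
      rw [hx] at h
      have hxs : xs = [] := (kkPopMin_none_iff xs).mp hx
      subst hxs
      simp at h
      obtain ⟨h1, h2⟩ := h
      subst h1; subst h2
      exact ⟨List.Perm.refl _, by simp⟩
    | some p =>
      cases p with
      | mk m' r' =>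
        rw [hx] at h
        obtain ⟨hperm, hmin⟩ := ih m' r' hx
        by_cases hle : x ≤ m'
        · simp [hle] at h
          obtain ⟨h1, h2⟩ := h
          subst h1; subst h2
          refine ⟨List.Perm.refl _, ?_⟩
          intro y hy
          rcases List.mem_cons.mp hy with h | h
          · exact le_of_eq h.symm
          · exact le_trans hle (hmin y h)
        · simp [hle] at h
          obtain ⟨h1, h2⟩ := h
          subst h1; subst h2
          constructor
          · exact (List.Perm.swap _ _ _).trans (hperm.cons x)
          · intro y hy
            rcases List.mem_cons.mp hy with h | h
            · subst h; omega
            · exact hmin y h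

theorem kkIns_perm (xs : List Int) (d : Int) : (kkIns xs d).Perm (d :: xs) := by
  induction xs with
  | nil => simp [kkIns]
  | cons x xs ih =>
    simp only [kkIns]
    by_cases h : x > d
    · simp only [h, if_true]
      exact (ih.cons x).trans (List.Perm.swap d x xs)
    · rw [if_neg h]

theorem kkIns_sorted (xs : List Int) (d : Int) (h : xs.Pairwise (· ≥ ·)) :
    (kkIns xs d).Pairwise (· ≥ ·) := by
  induction xs with
  | nil => simp [kkIns]
  | cons x xs ih =>
    rcases List.pairwise_cons.mp h with ⟨hx, hxs⟩
    simp only [kkIns]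
    by_cases hgt : x > d
    · simp only [hgt, if_true]
      refine List.pairwise_cons.mpr ⟨?_, ih hxs⟩
      intro y hy
      have := (kkIns_perm xs d).mem_iff.mp hy
      rcases List.mem_cons.mp this with h1 | h1
      · omega
      · exact hx y h1
    · simp only [hgt, if_false]
      refine List.pairwise_cons.mpr ⟨?_, h⟩
      intro y hy
      rcases List.mem_cons.mp hy with h1 | h1
      · omega
      · have := hx y h1; omega

theorem kkLoop_perm (n : Nat) (w h : List Int)
    (hlen : w.length = n + 1) (hsort : w.Pairwise (· ≥ ·))
    (hperm : h.Perm (w.map (fun x => -x))) :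
    (kkLoop n h).Perm ((kkAltLoop n w).map (fun x => -x)) ∧ (kkAltLoop n w).length = 1 := by
  induction n generalizing w h with
  | zero => exact ⟨hperm, hlen⟩
  | succ n ih =>
    match w, hlen with
    | a :: b :: rest, hlen =>
      -- first pop: returns -a
      have hne : h ≠ [] := by
        intro hh; subst hh
        have := hperm.length_eq; simp at this
      obtain ⟨p, hp⟩ : ∃ p, kkPopMin h = some p := by
        cases hh : kkPopMin h with
        | none => exact absurd ((kkPopMin_none_iff h).mp hh) hne
        | some p => exact ⟨p, rfl⟩
      obtain ⟨m, h1⟩ := p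
      obtain ⟨hperm1, hmin1⟩ := kkPopMin_spec h m h1 hp
      rcases List.pairwise_cons.mp hsort with ⟨ha, hsort'⟩
      rcases List.pairwise_cons.mp hsort' with ⟨hb, hrest⟩
      have hma : m = -a := by
        have h1mem : (-a) ∈ h := hperm.mem_iff.mpr (by simp)
        have h2 : m ∈ h := hperm1.subset (by simp)
        have h3 : m ∈ (a :: b :: rest).map (fun x => -x) := hperm.mem_iff.mp h2
        obtain ⟨y, hy, hyo⟩ := List.mem_map.mp h3
        have : y ≤ a := by
          rcases List.mem_cons.mp hy with h' | h'
          · omega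
          · rcases List.mem_cons.mp h' with h'' | h''
            · have := ha b (by simp); omega
            · have := ha y (by simp [h'']); omega
        have hle : m ≤ -a := hmin1 (-a) h1mem
        omega
      subst hma
      have hperm1' : h1.Perm ((b :: rest).map (fun x => -x)) := by
        have : ((-a) :: h1).Perm ((-a) :: (b :: rest).map (fun x => -x)) := hperm1.trans (by simpa using hperm)
        exact this.cons_inv
      -- second pop: returns -b
      have hne1 : h1 ≠ [] := by
        intro hh; subst hh
        have := hperm1'.length_eq; simp at this
      obtain ⟨p2, hp2⟩ : ∃ p2, kkPopMin h1 = some p2 := by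
        cases hh : kkPopMin h1 with
        | none => exact absurd ((kkPopMin_none_iff h1).mp hh) hne1
        | some p2 => exact ⟨p2, rfl⟩
      obtain ⟨m2, h2l⟩ := p2
      obtain ⟨hperm2, hmin2⟩ := kkPopMin_spec h1 m2 h2l hp2
      have hmb : m2 = -b := by
        have hbmem : (-b) ∈ h1 := hperm1'.mem_iff.mpr (by simp)
        have h2 : m2 ∈ h1 := hperm2.subset (by simp)
        have h3 : m2 ∈ (b :: rest).map (fun x => -x) := hperm1'.mem_iff.mp h2
        obtain ⟨y, hy, hyo⟩ := List.mem_map.mp h3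
        have : y ≤ b := by
          rcases List.mem_cons.mp hy with h' | h'
          · omega
          · have := hb y h'; omega
        have hle : m2 ≤ -b := hmin2 (-b) hbmem
        omega
      subst hmb
      have hperm2' : h2l.Perm (rest.map (fun x => -x)) := by
        have : ((-b) :: h2l).Perm ((-b) :: rest.map (fun x => -x)) := hperm2.trans (by simpa using hperm1')
        exact this.cons_inv
      -- combined step
      have hstep : (h2l ++ [(-a) - (-b)]).Perm ((kkIns rest (a - b)).map (fun x => -x)) := by
        have hmapperm : ((kkIns rest (a - b)).map (fun x => -x)).Perm ((-(a - b)) :: rest.map (fun x => -x)) := by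
          simpa using (kkIns_perm rest (a - b)).map (fun x => -x)
        have e1 : (h2l ++ [(-a) - (-b)]).Perm (((-a) - (-b)) :: h2l) :=
          List.perm_append_singleton _ _
        have e2 : (((-a) - (-b)) :: h2l).Perm (((-a) - (-b)) :: rest.map (fun x => -x)) :=
          hperm2'.cons _
        have e3 : (-a) - (-b) = -(a - b) := by ring
        refine e1.trans (e2.trans ?_)
        rw [e3]
        exact hmapperm.symm
      have hlen' : (kkIns rest (a - b)).length = n + 1 := by
        have := (kkIns_perm rest (a - b)).length_eq
        simp at this hlen ⊢
        omega
      have hsortIns : (kkIns rest (a - b)).Pairwise (· ≥ ·) := kkIns_sorted rest (a - b) hrest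
      have heq : rest.insertIdx (kkFind rest (a - b) 0 rest.length rest.length) (a - b)
          = kkIns rest (a - b) := by
        obtain ⟨_, _, hfl, hfh⟩ := kkFind_spec rest (a - b) hrest rest.length 0 rest.length
          (by omega) (le_refl _) (by omega)
          (fun k hk => absurd hk (Nat.not_lt_zero k))
          (fun k hk hk' => absurd (Nat.lt_of_lt_of_le hk' hk) (lt_irrefl _))
        exact kkInsertIdx_eq_kkIns (a - b) rest _
          ((kkFind_spec rest (a - b) hrest rest.length 0 rest.length (by omega) (le_refl _)
            (by omega) (fun k hk => absurd hk (Nat.not_lt_zero k))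
            (fun k hk hk' => absurd (Nat.lt_of_lt_of_le hk' hk) (lt_irrefl _))).2.1) hfl hfh
      have := ih (kkIns rest (a - b)) (h2l ++ [(-a) - (-b)]) hlen' hsortIns hstep
      simpa [kkLoop, hp, hp2, kkAltLoop, heq] using this
    | [a], hlen => simp at hlen

-- ===== VERDICT (by name: the statement is the Claim_ definition above) =====
theorem kk_spec : Claim_equal_kk := by
  intro array _hdom hpre
  unfold Spec_kk kk kk_alt
  have hne : array ≠ [] := hpre
  have hlen0 : 1 ≤ array.length := by
    cases array with
    | nil => exact absurd rfl hne
    | cons x xs => simp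
  set w0 := PySem.List.sorted array (fun x => x) true with hw0
  have hperm0 : w0.Perm array := PySem.List.sorted_perm array (fun x => x) true
  have hlenw0 : w0.length = (array.length - 1) + 1 := by
    have := hperm0.length_eq
    omega
  have hsort0 : w0.Pairwise (· ≥ ·) := by
    have := PySem.List.sorted_pairwise_rev array (fun x => x)
    exact this.imp (fun {a b} h => h)
  have hperminit : (array.map (fun x => -x)).Perm (w0.map (fun x => -x)) :=
    (hperm0.symm).map (fun x => -x)
  obtain ⟨hfinperm, hfinlen⟩ := kkLoop_perm (array.length - 1) w0 (array.map (fun x => -x))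
    hlenw0 hsort0 hperminit
  obtain ⟨x, hx⟩ := List.length_eq_one_iff.mp hfinlen
  rw [hx] at hfinperm
  have hfin : kkLoop (array.length - 1) (array.map (fun x => -x)) = [-x] := by
    have : (kkLoop (array.length - 1) (array.map (fun x => -x))).Perm [-x] := by
      simpa using hfinperm
    exact List.perm_singleton.mp this
  simp only [hfin, hx]
  simp [kkPopMin, PySem.List.pyGet?, PySem.List.pyIdx?]
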